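-- pv_equiv track=rewrite | github.com/jjoshua2/arc_agi | unsolved/2025-10-02T21-13-22Z/8a004b2b_best1.py | transform
-- ===== SOURCE A (Python) =====
-- def transform(grid_lst: list[list[int]]) -> list[list[int]]:
--     if not grid_lst or not grid_lst[0]:
--         return []
--     h_grid = len(grid_lst)
--     w_grid = len(grid_lst[0])
--     candidates_high = []
--     candidates_all = []
--     for C in range(1, 10):
--         positions = [(r, c) for r in range(h_grid) for c in range(w_grid) if grid_lst[r][c] == C]
--         if not positions:
--             continue
--         min_r = min(r for r, c in positions)
--         max_r = max(r for r, c in positions)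
--         min_c = min(c for r, c in positions)
--         max_c = max(c for r, c in positions)
--         area = (max_r - min_r + 1) * (max_c - min_c + 1)
--         info = (area, C, min_r, max_r, min_c, max_c)
--         candidates_all.append(info)
--         if C >= 6:
--             candidates_high.append(info)
--     if candidates_high:
--         candidates_high.sort(key=lambda x: (-x[0], -x[1]))
--         selected = candidates_high[0]
--     else:
--         if not candidates_all:
--             return []
--         candidates_all.sort(key=lambda x: (-x[0], -x[1]))
--         selected = candidates_all[0]
--     _, C, min_r, max_r, min_c, max_c = selected
--     h_out = max_r - min_r + 1
--     w_out = max_c - min_c + 1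
--     output = [[0] * w_out for _ in range(h_out)]
--     for r in range(h_grid):
--         for c in range(w_grid):
--             if grid_lst[r][c] == C:
--                 rel_r = r - min_r
--                 rel_c = c - min_c
--                 output[rel_r][rel_c] = C
--     return output
-- ===== SOURCE B (Python) =====
-- def transform(grid_lst: list[list[int]]) -> list[list[int]]:
--     if not grid_lst or not grid_lst[0]:
--         return []
--     w = len(grid_lst[0])
--     # one pass: running bounding box per color 1..9
--     bounds = [None] * 10
--     for r, row in enumerate(grid_lst):
--         for c in range(w):
--             v = row[c]
--             if 1 <= v <= 9:
--                 b = bounds[v]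
--                 if b is None:
--                     bounds[v] = (r, r, c, c)
--                 else:
--                     bounds[v] = (min(b[0], r), max(b[1], r), min(b[2], c), max(b[3], c))
--     # running maximum by (area, C), kept separately for high colors (C >= 6)
--     best = None
--     high = None
--     for C in range(1, 10):
--         b = bounds[C]
--         if b is None:
--             continue
--         area = (b[1] - b[0] + 1) * (b[3] - b[2] + 1)
--         if best is None or (area, C) > (best[0], best[1]):
--             best = (area, C, b)
--         if C >= 6 and (high is None or (area, C) > (high[0], high[1])):
--             high = (area, C, b)
--     sel = high if high is not None else best
--     if sel is None:
--         return []
--     _, C, (r0, r1, c0, c1) = sel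
--     return [[C if grid_lst[r][c] == C else 0 for c in range(c0, c1 + 1)]
--             for r in range(r0, r1 + 1)]
-- ===== Notes on version B (the rewrite author's own statement) =====
-- stated objective: faster
-- what changed: Replaces A's nine full-grid scans (one per color, each with four extra min/max passes over the positions list) by a single pass maintaining a running bounding box per color, replaces the sort-then-take-first selection by a running maximum over (area, C), and builds the output grid by a direct comprehension instead of allocating zeros and mutating.
import Mathlib
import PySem

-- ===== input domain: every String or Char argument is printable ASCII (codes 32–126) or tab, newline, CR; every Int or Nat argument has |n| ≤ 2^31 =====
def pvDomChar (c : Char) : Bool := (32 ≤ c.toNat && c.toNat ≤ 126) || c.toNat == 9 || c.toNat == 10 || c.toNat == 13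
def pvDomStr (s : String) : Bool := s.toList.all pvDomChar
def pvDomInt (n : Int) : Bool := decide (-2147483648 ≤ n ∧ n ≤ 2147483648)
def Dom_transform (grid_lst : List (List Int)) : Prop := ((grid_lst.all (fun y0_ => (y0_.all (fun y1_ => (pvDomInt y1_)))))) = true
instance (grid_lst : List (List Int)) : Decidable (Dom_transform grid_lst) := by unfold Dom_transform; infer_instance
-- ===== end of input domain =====

-- B replaces A's nine per-color full-grid scans by one pass keeping a running bounding box per
-- color, the sort-then-take-first selection by a running maximum, and the zero-fill-then-mutate
-- output construction by a direct comprehension (objective: faster by a constant factor).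

-- ===== PORT A =====
-- grid_lst[r][c]; in-range under Pre_transform (out-of-range would be Python's IndexError)
def pvVal (g : List (List Int)) (r c : Int) : Int :=
  PySem.List.pyGetD (PySem.List.pyGetD g r []) c 0

-- the output-construction tail of A (written once in Python after the if/else selection)
def pvBuild (g : List (List Int)) (h w : Int) (sel : Int × Int × Int × Int × Int × Int) :
    List (List Int) :=
  let C := sel.2.1
  let min_r := sel.2.2.1
  let max_r := sel.2.2.2.1
  let min_c := sel.2.2.2.2.1
  let max_c := sel.2.2.2.2.2
  let h_out := max_r - min_r + 1
  let w_out := max_c - min_c + 1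
  let out0 := List.replicate h_out.toNat (List.replicate w_out.toNat (0 : Int))
  (PySem.List.pyRange 0 h).foldl (fun out r =>
    (PySem.List.pyRange 0 w).foldl (fun out c =>
      if pvVal g r c = C then
        PySem.List.pySetD out (r - min_r)
          (PySem.List.pySetD (PySem.List.pyGetD out (r - min_r) []) (c - min_c) C)
      else out) out) out0

def transform (grid_lst : List (List Int)) : List (List Int) :=
  if grid_lst = [] ∨ grid_lst.headD [] = [] then []
  else
    let h : Int := PySem.List.len grid_lst
    let w : Int := PySem.List.len (grid_lst.headD [])
    let cands :=
      (PySem.List.pyRange 1 10).foldl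
        (fun (acc : List (Int × Int × Int × Int × Int × Int) × List (Int × Int × Int × Int × Int × Int)) C =>
          let positions := (PySem.List.pyRange 0 h).flatMap (fun r =>
            (PySem.List.pyRange 0 w).filterMap (fun c =>
              if pvVal grid_lst r c = C then some (r, c) else none))
          match positions with
          | [] => acc
          | _ :: _ =>
            let min_r := (PySem.List.min? (positions.map Prod.fst) (fun y => y)).getD 0
            let max_r := (PySem.List.max? (positions.map Prod.fst) (fun y => y)).getD 0
            let min_c := (PySem.List.min? (positions.map Prod.snd) (fun y => y)).getD 0
            let max_c := (PySem.List.max? (positions.map Prod.snd) (fun y => y)).getD 0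
            let area := (max_r - min_r + 1) * (max_c - min_c + 1)
            let info := (area, C, min_r, max_r, min_c, max_c)
            (acc.1 ++ [info], if 6 ≤ C then acc.2 ++ [info] else acc.2))
        ([], [])
    if cands.2 ≠ [] then
      -- candidates_high.sort(key=λx.(-x[0],-x[1])); selected = candidates_high[0] (nonempty here)
      pvBuild grid_lst h w
        ((PySem.List.sorted2 cands.2 (fun x => -x.1) (fun x => -x.2.1)).headD (0, 0, 0, 0, 0, 0))
    else if cands.1 = [] then []
    else
      pvBuild grid_lst h w
        ((PySem.List.sorted2 cands.1 (fun x => -x.1) (fun x => -x.2.1)).headD (0, 0, 0, 0, 0, 0))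

-- ===== PORT B =====
def transform_alt (grid_lst : List (List Int)) : List (List Int) :=
  if grid_lst = [] ∨ grid_lst.headD [] = [] then []
  else
    let w : Int := PySem.List.len (grid_lst.headD [])
    -- one pass: bounds[v] is the running (min_r, max_r, min_c, max_c) of color v
    let bounds :=
      (PySem.List.enumerate grid_lst).foldl (fun bnds rr =>
        (PySem.List.pyRange 0 w).foldl (fun bnds c =>
          let v := PySem.List.pyGetD rr.2 c 0
          if 1 ≤ v ∧ v ≤ 9 then
            match PySem.List.pyGetD bnds v none with
            | none => PySem.List.pySetD bnds v (some (rr.1, rr.1, c, c))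
            | some b =>
              PySem.List.pySetD bnds v
                (some (min b.1 rr.1, max b.2.1 rr.1, min b.2.2.1 c, max b.2.2.2 c))
          else bnds) bnds)
        (List.replicate 10 (none : Option (Int × Int × Int × Int)))
    -- running maximum by (area, C); `high` restricted to C ≥ 6
    let sel :=
      (PySem.List.pyRange 1 10).foldl
        (fun (st : Option (Int × Int × Int × Int × Int × Int) × Option (Int × Int × Int × Int × Int × Int)) C =>
          match PySem.List.pyGetD bounds C none with
          | none => st
          | some b =>
            let area := (b.2.1 - b.1 + 1) * (b.2.2.2 - b.2.2.1 + 1)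
            let x := (area, C, b.1, b.2.1, b.2.2.1, b.2.2.2)
            let best := match st.1 with
              | none => some x
              | some y => if y.1 < area ∨ (y.1 = area ∧ y.2.1 < C) then some x else some y
            let high := if 6 ≤ C then
                match st.2 with
                | none => some x
                | some y => if y.1 < area ∨ (y.1 = area ∧ y.2.1 < C) then some x else some y
              else st.2
            (best, high))
        (none, none)
    match (match sel.2 with | some s => some s | none => sel.1) with
    | none => []
    | some s =>
      (PySem.List.pyRange s.2.2.1 (s.2.2.2.1 + 1)).map (fun r =>
        (PySem.List.pyRange s.2.2.2.2.1 (s.2.2.2.2.2 + 1)).map (fun c =>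
          if pvVal grid_lst r c = s.2.1 then s.2.1 else 0))

-- ===== PRECONDITION & SPEC =====
-- Pre_ excludes exactly the ragged grids on which Python A raises IndexError (a row shorter
-- than the first row); on every grid with all rows at least as long as the first, A returns.
def Pre_transform (grid_lst : List (List Int)) : Prop :=
  ∀ row ∈ grid_lst, (grid_lst.headD []).length ≤ row.length
instance (grid_lst : List (List Int)) : Decidable (Pre_transform grid_lst) := by
  unfold Pre_transform; infer_instance

def pvWitness_transform : List (List Int) := [[1]]

def Spec_transform (grid_lst : List (List Int)) (out : List (List Int)) : Prop :=
  out = transform_alt grid_lst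
instance (grid_lst : List (List Int)) (out : List (List Int)) : Decidable (Spec_transform grid_lst out) := by
  unfold Spec_transform; infer_instance

-- ===== CLAIM (what is proved, stated in full; the proofs are below) =====
def Claim_equal_transform : Prop :=
  ∀ (grid_lst : List (List Int)), Dom_transform grid_lst → Pre_transform grid_lst →
    Spec_transform grid_lst (transform grid_lst)

-- ===== LEMMAS AND PROOFS =====


-- ----- shared abstractions for the proof -----

-- the row-major list of all cell coordinates
def pvCells (h w : Int) : List (Int × Int) :=
  (PySem.List.pyRange 0 h).flatMap (fun r => (PySem.List.pyRange 0 w).map (fun c => (r, c)))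

-- running bounding-box combine
def pvComb (o : Option (Int × Int × Int × Int)) (p : Int × Int) : Option (Int × Int × Int × Int) :=
  some (match o with
    | none => (p.1, p.1, p.2, p.2)
    | some b => (min b.1 p.1, max b.2.1 p.1, min b.2.2.1 p.2, max b.2.2.2 p.2))

def pvPos (g : List (List Int)) (h w C : Int) : List (Int × Int) :=
  (pvCells h w).filter (fun p => pvVal g p.1 p.2 = C)

def pvAgg (g : List (List Int)) (h w C : Int) : Option (Int × Int × Int × Int) :=
  (pvPos g h w C).foldl pvComb none

def pvInfo (C : Int) (b : Int × Int × Int × Int) : Int × Int × Int × Int × Int × Int :=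
  ((b.2.1 - b.1 + 1) * (b.2.2.2 - b.2.2.1 + 1), C, b.1, b.2.1, b.2.2.1, b.2.2.2)

def pvFC (g : List (List Int)) (h w C : Int) : Option (Int × Int × Int × Int × Int × Int) :=
  (pvAgg g h w C).map (pvInfo C)

def pvCand (g : List (List Int)) (h w : Int) : List (Int × Int × Int × Int × Int × Int) :=
  (PySem.List.pyRange 1 10).filterMap (pvFC g h w)

def pvRm (m : Option (Int × Int × Int × Int × Int × Int)) (x : Int × Int × Int × Int × Int × Int) :
    Option (Int × Int × Int × Int × Int × Int) :=
  match m with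
  | none => some x
  | some y => if y.1 < x.1 ∨ (y.1 = x.1 ∧ y.2.1 < x.2.1) then some x else some y

def pvRunMax (l : List (Int × Int × Int × Int × Int × Int)) :
    Option (Int × Int × Int × Int × Int × Int) :=
  l.foldl pvRm none

-- ----- generic foldl-min/max facts on Int -----

theorem pv_foldl_min_mem (l : List Int) (x : Int) : l.foldl min x ∈ x :: l := by
  induction l generalizing x with
  | nil => simp
  | cons y t ih =>
    simp only [List.foldl_cons]
    have h := ih (min x y)
    rw [List.mem_cons] at h
    rcases h with h | h
    · rcases min_choice x y with hc | hc <;> rw [h, hc] <;> simp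
    · simp [h]

theorem pv_foldl_max_mem (l : List Int) (x : Int) : l.foldl max x ∈ x :: l := by
  induction l generalizing x with
  | nil => simp
  | cons y t ih =>
    simp only [List.foldl_cons]
    have h := ih (max x y)
    rw [List.mem_cons] at h
    rcases h with h | h
    · rcases max_choice x y with hc | hc <;> rw [h, hc] <;> simp
    · simp [h]

theorem pv_foldl_min_le (l : List Int) (x : Int) : ∀ y ∈ x :: l, l.foldl min x ≤ y := by
  induction l generalizing x with
  | nil => simp
  | cons z t ih =>
    intro y hy
    simp only [List.foldl_cons]
    have hle : List.foldl min (min x z) t ≤ min x z :=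
      ih (min x z) (min x z) (List.mem_cons_self ..)
    rw [List.mem_cons, List.mem_cons] at hy
    rcases hy with rfl | rfl | hy
    · exact le_trans hle (min_le_left ..)
    · exact le_trans hle (min_le_right ..)
    · exact ih (min x z) y (List.mem_cons_of_mem _ hy)

theorem pv_foldl_le_max (l : List Int) (x : Int) : ∀ y ∈ x :: l, y ≤ l.foldl max x := by
  induction l generalizing x with
  | nil => simp
  | cons z t ih =>
    intro y hy
    simp only [List.foldl_cons]
    have hle : max x z ≤ List.foldl max (max x z) t :=
      ih (max x z) (max x z) (List.mem_cons_self ..)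
    rw [List.mem_cons, List.mem_cons] at hy
    rcases hy with rfl | rfl | hy
    · exact le_trans (le_max_left ..) hle
    · exact le_trans (le_max_right ..) hle
    · exact ih (max x z) y (List.mem_cons_of_mem _ hy)


-- ----- characterisation of the bounding-box aggregate -----

theorem pvComb_foldl_some (ps : List (Int × Int)) :
    ∀ (a b d e : Int), ps.foldl pvComb (some (a, b, d, e)) =
      some ((ps.map Prod.fst).foldl min a, (ps.map Prod.fst).foldl max b,
            (ps.map Prod.snd).foldl min d, (ps.map Prod.snd).foldl max e) := by
  induction ps with
  | nil => intro a b d e; rfl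
  | cons p t ih => intro a b d e; simpa [pvComb] using ih (min a p.1) (max b p.1) (min d p.2) (max e p.2)

theorem pvAgg_eq_none_iff (g : List (List Int)) (h w C : Int) :
    pvAgg g h w C = none ↔ pvPos g h w C = [] := by
  unfold pvAgg
  cases hp : pvPos g h w C with
  | nil => simp
  | cons p t => simp [List.foldl_cons, pvComb, pvComb_foldl_some]

theorem pvAgg_cons (g : List (List Int)) (h w C : Int) (p : Int × Int) (t : List (Int × Int))
    (hp : pvPos g h w C = p :: t) :
    pvAgg g h w C = some ((t.map Prod.fst).foldl min p.1, (t.map Prod.fst).foldl max p.1,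
      (t.map Prod.snd).foldl min p.2, (t.map Prod.snd).foldl max p.2) := by
  unfold pvAgg
  rw [hp]
  simp [List.foldl_cons, pvComb, pvComb_foldl_some]

theorem pv_mem_cells (h w : Int) (p : Int × Int) :
    p ∈ pvCells h w ↔ (0 ≤ p.1 ∧ p.1 < h ∧ 0 ≤ p.2 ∧ p.2 < w) := by
  unfold pvCells
  rw [List.mem_flatMap]
  constructor
  · rintro ⟨r, hr, hp⟩
    rw [List.mem_map] at hp
    rcases hp with ⟨c, hc, rfl⟩
    rw [PySem.List.mem_pyRange_one] at hr hc
    exact ⟨hr.1, hr.2, hc.1, hc.2⟩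
  · rintro ⟨h1, h2, h3, h4⟩
    exact ⟨p.1, PySem.List.mem_pyRange_one.2 ⟨h1, h2⟩,
      List.mem_map.2 ⟨p.2, PySem.List.mem_pyRange_one.2 ⟨h3, h4⟩, rfl⟩⟩

theorem pv_mem_pos (g : List (List Int)) (h w C : Int) (p : Int × Int) :
    p ∈ pvPos g h w C ↔ (0 ≤ p.1 ∧ p.1 < h ∧ 0 ≤ p.2 ∧ p.2 < w ∧ pvVal g p.1 p.2 = C) := by
  unfold pvPos
  rw [List.mem_filter, pv_mem_cells]
  simp only [decide_eq_true_eq]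
  tauto

theorem pvAgg_spec (g : List (List Int)) (h w C : Int) (b : Int × Int × Int × Int)
    (hb : pvAgg g h w C = some b) :
    (∀ p ∈ pvPos g h w C, b.1 ≤ p.1 ∧ p.1 ≤ b.2.1 ∧ b.2.2.1 ≤ p.2 ∧ p.2 ≤ b.2.2.2) ∧
    b.1 ∈ (pvPos g h w C).map Prod.fst ∧ b.2.1 ∈ (pvPos g h w C).map Prod.fst ∧
    b.2.2.1 ∈ (pvPos g h w C).map Prod.snd ∧ b.2.2.2 ∈ (pvPos g h w C).map Prod.snd := by
  cases hp : pvPos g h w C with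
  | nil =>
    rw [pvAgg] at hb; rw [hp] at hb; simp at hb
  | cons p t =>
    rw [pvAgg_cons g h w C p t hp] at hb
    cases hb
    refine ⟨?_, ?_, ?_, ?_, ?_⟩
    · intro q hq
      have hq' : q.1 ∈ p.1 :: t.map Prod.fst ∧ q.2 ∈ p.2 :: t.map Prod.snd := by
        rw [List.mem_cons] at hq
        rcases hq with rfl | hq
        · simp
        · exact ⟨List.mem_cons_of_mem _ (List.mem_map_of_mem hq),
                 List.mem_cons_of_mem _ (List.mem_map_of_mem hq)⟩
      exact ⟨pv_foldl_min_le _ _ _ hq'.1, pv_foldl_le_max _ _ _ hq'.1,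
             pv_foldl_min_le _ _ _ hq'.2, pv_foldl_le_max _ _ _ hq'.2⟩
    · simpa using pv_foldl_min_mem (t.map Prod.fst) p.1
    · simpa using pv_foldl_max_mem (t.map Prod.fst) p.1
    · simpa using pv_foldl_min_mem (t.map Prod.snd) p.2
    · simpa using pv_foldl_max_mem (t.map Prod.snd) p.2


-- ----- A's per-color scan produces pvPos / pvAgg -----

theorem pvA_positions (g : List (List Int)) (h w C : Int) :
    ((PySem.List.pyRange 0 h).flatMap (fun r =>
      (PySem.List.pyRange 0 w).filterMap (fun c =>
        if pvVal g r c = C then some (r, c) else none))) = pvPos g h w C := by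
  unfold pvPos pvCells
  rw [List.filter_flatMap]
  congr 1
  funext r
  induction (PySem.List.pyRange 0 w) with
  | nil => rfl
  | cons c t ih =>
    by_cases hv : pvVal g r c = C <;>
      simp [hv, ih]

theorem pvA_cands (g : List (List Int)) (h w : Int) (l : List Int) :
    ∀ (a1 a2 : List (Int × Int × Int × Int × Int × Int)),
    l.foldl
      (fun (acc : List (Int × Int × Int × Int × Int × Int) × List (Int × Int × Int × Int × Int × Int)) C =>
        let positions := (PySem.List.pyRange 0 h).flatMap (fun r =>
          (PySem.List.pyRange 0 w).filterMap (fun c =>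
            if pvVal g r c = C then some (r, c) else none))
        match positions with
        | [] => acc
        | _ :: _ =>
          let min_r := (PySem.List.min? (positions.map Prod.fst) (fun y => y)).getD 0
          let max_r := (PySem.List.max? (positions.map Prod.fst) (fun y => y)).getD 0
          let min_c := (PySem.List.min? (positions.map Prod.snd) (fun y => y)).getD 0
          let max_c := (PySem.List.max? (positions.map Prod.snd) (fun y => y)).getD 0
          let area := (max_r - min_r + 1) * (max_c - min_c + 1)
          let info := (area, C, min_r, max_r, min_c, max_c)
          (acc.1 ++ [info], if 6 ≤ C then acc.2 ++ [info] else acc.2))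
      (a1, a2) =
    (a1 ++ l.filterMap (pvFC g h w), a2 ++ (l.filterMap (pvFC g h w)).filter (fun x => 6 ≤ x.2.1)) := by
  induction l with
  | nil => intro a1 a2; simp
  | cons C t ih =>
    intro a1 a2
    rw [List.foldl_cons]
    have hbody : (let positions := (PySem.List.pyRange 0 h).flatMap (fun r =>
          (PySem.List.pyRange 0 w).filterMap (fun c =>
            if pvVal g r c = C then some (r, c) else none))
        match positions with
        | [] => (a1, a2)
        | _ :: _ =>
          let min_r := (PySem.List.min? (positions.map Prod.fst) (fun y => y)).getD 0
          let max_r := (PySem.List.max? (positions.map Prod.fst) (fun y => y)).getD 0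
          let min_c := (PySem.List.min? (positions.map Prod.snd) (fun y => y)).getD 0
          let max_c := (PySem.List.max? (positions.map Prod.snd) (fun y => y)).getD 0
          let area := (max_r - min_r + 1) * (max_c - min_c + 1)
          let info := (area, C, min_r, max_r, min_c, max_c)
          (a1 ++ [info], if 6 ≤ C then a2 ++ [info] else a2)) =
        (match pvFC g h w C with
          | none => (a1, a2)
          | some x => (a1 ++ [x], if 6 ≤ C then a2 ++ [x] else a2)) := by
      simp only [pvA_positions]
      cases hp : pvPos g h w C with
      | nil =>
        have : pvFC g h w C = none := by
          unfold pvFC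
          rw [(pvAgg_eq_none_iff g h w C).2 hp]
          rfl
        rw [this]
      | cons p t' =>
        have hagg := pvAgg_cons g h w C p t' hp
        have : pvFC g h w C = some (pvInfo C ((t'.map Prod.fst).foldl min p.1,
            (t'.map Prod.fst).foldl max p.1, (t'.map Prod.snd).foldl min p.2,
            (t'.map Prod.snd).foldl max p.2)) := by
          unfold pvFC; rw [hagg]; rfl
        rw [this]
        simp only [List.map_cons, PySem.List.min?_id_cons, PySem.List.max?_id_cons,
          Option.getD_some, pvInfo]
    rw [hbody]
    cases hfc : pvFC g h w C with
    | none => rw [ih]; simp [hfc]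
    | some x =>
      have hx : x.2.1 = C := by
        unfold pvFC at hfc
        cases hagg : pvAgg g h w C with
        | none => rw [hagg] at hfc; simp at hfc
        | some b => rw [hagg] at hfc; simp at hfc; rw [← hfc]; rfl
      rw [ih]
      by_cases h6 : 6 ≤ C <;>
        simp [hfc, hx, h6]

-- ----- head of Python's sort = running maximum -----

theorem pv_insertBy_head {α : Type} (before : α → α → Bool) (x : α) (l : List α) :
    (PySem.List.insertBy before x l).head? =
      some (match l with | [] => x | y :: _ => if before x y then x else y) := by
  cases l with
  | nil => rfl
  | cons y t => by_cases hb : before x y <;> simp [PySem.List.insertBy, hb]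

theorem pv_foldl_insertBy_head {α : Type} (before : α → α → Bool) (l : List α) :
    ∀ (acc : List α),
    (l.foldl (fun a x => PySem.List.insertBy before x a) acc).head? =
      l.foldl (fun m x => match m with
        | none => some x
        | some y => some (if before x y then x else y)) acc.head? := by
  induction l with
  | nil => intro acc; rfl
  | cons x t ih =>
    intro acc
    rw [List.foldl_cons, List.foldl_cons, ih]
    congr 1
    rw [pv_insertBy_head]
    cases acc <;> rfl

theorem pvRm_none (x : Int × Int × Int × Int × Int × Int) : pvRm none x = some x := rfl

theorem pvRm_some (y x : Int × Int × Int × Int × Int × Int) :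
    pvRm (some y) x = if y.1 < x.1 ∨ (y.1 = x.1 ∧ y.2.1 < x.2.1) then some x else some y := rfl

theorem pv_sorted2_head (l : List (Int × Int × Int × Int × Int × Int)) :
    (PySem.List.sorted2 l (fun x => -x.1) (fun x => -x.2.1)).head? = pvRunMax l := by
  unfold PySem.List.sorted2 pvRunMax
  simp only [if_neg (by decide : ¬ (false = true))]
  rw [pv_foldl_insertBy_head]
  apply PySem.List.foldl_congr_mem
  intro m x _
  cases m with
  | none => rfl
  | some y =>
    rw [pvRm_some]
    show some (if (decide (-x.1 < -y.1) || (!decide (-y.1 < -x.1) && decide (-x.2.1 < -y.2.1))) = true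
        then x else y) = _
    by_cases hc : y.1 < x.1 ∨ (y.1 = x.1 ∧ y.2.1 < x.2.1)
    · have hb : (decide (-x.1 < -y.1) || (!decide (-y.1 < -x.1) && decide (-x.2.1 < -y.2.1))) = true := by
        simp only [Bool.or_eq_true, Bool.and_eq_true, Bool.not_eq_true', decide_eq_true_eq,
          decide_eq_false_iff_not]
        omega
      rw [hb, if_pos hc]
      simp
    · have hb : (decide (-x.1 < -y.1) || (!decide (-y.1 < -x.1) && decide (-x.2.1 < -y.2.1))) = false := by
        simp only [Bool.or_eq_false_iff, Bool.and_eq_false_iff, Bool.not_eq_false',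
          decide_eq_false_iff_not, decide_eq_true_eq]
        omega
      rw [hb]
      simp [if_neg hc]

-- ----- running-maximum facts -----

theorem pv_foldl_rm_some (l : List (Int × Int × Int × Int × Int × Int))
    (y : Int × Int × Int × Int × Int × Int) :
    ∃ z, l.foldl pvRm (some y) = some z ∧ (z = y ∨ z ∈ l) := by
  induction l generalizing y with
  | nil => exact ⟨y, rfl, Or.inl rfl⟩
  | cons x t ih =>
    rw [List.foldl_cons]
    rw [pvRm_some]
    by_cases hc : y.1 < x.1 ∨ (y.1 = x.1 ∧ y.2.1 < x.2.1)
    · rw [if_pos hc]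
      rcases ih x with ⟨z, hz, hm⟩
      exact ⟨z, hz, by rcases hm with rfl | h2 <;> simp [*]⟩
    · rw [if_neg hc]
      rcases ih y with ⟨z, hz, hm⟩
      exact ⟨z, hz, by rcases hm with rfl | h2 <;> simp [*]⟩

theorem pvRunMax_eq_none_iff (l : List (Int × Int × Int × Int × Int × Int)) :
    pvRunMax l = none ↔ l = [] := by
  cases l with
  | nil => simp [pvRunMax]
  | cons x t =>
    simp only [pvRunMax, List.foldl_cons]
    rcases pv_foldl_rm_some t x with ⟨z, hz, _⟩
    rw [pvRm_none]
    simp [hz]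

theorem pvRunMax_mem (l : List (Int × Int × Int × Int × Int × Int))
    (s : Int × Int × Int × Int × Int × Int) (hs : pvRunMax l = some s) : s ∈ l := by
  cases l with
  | nil => simp [pvRunMax] at hs
  | cons x t =>
    simp only [pvRunMax, List.foldl_cons] at hs
    rcases pv_foldl_rm_some t x with ⟨z, hz, hm⟩
    rw [pvRm_none, hz] at hs
    cases hs
    rcases hm with rfl | h2 <;> simp [*]


-- ----- B's single pass computes pvAgg for every color -----

def pvUpd (g : List (List Int)) (bnds : List (Option (Int × Int × Int × Int))) (p : Int × Int) :
    List (Option (Int × Int × Int × Int)) :=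
  let v := pvVal g p.1 p.2
  if 1 ≤ v ∧ v ≤ 9 then
    match PySem.List.pyGetD bnds v none with
    | none => PySem.List.pySetD bnds v (some (p.1, p.1, p.2, p.2))
    | some b =>
      PySem.List.pySetD bnds v (some (min b.1 p.1, max b.2.1 p.1, min b.2.2.1 p.2, max b.2.2.2 p.2))
  else bnds

theorem pvUpd_eq (g : List (List Int)) (bnds : List (Option (Int × Int × Int × Int))) (p : Int × Int) :
    pvUpd g bnds p =
      if 1 ≤ pvVal g p.1 p.2 ∧ pvVal g p.1 p.2 ≤ 9 then
        PySem.List.pySetD bnds (pvVal g p.1 p.2)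
          (pvComb (PySem.List.pyGetD bnds (pvVal g p.1 p.2) none) p)
      else bnds := by
  simp only [pvUpd, pvComb]
  split_ifs with hv
  · cases hg : PySem.List.pyGetD bnds (pvVal g p.1 p.2) none <;> rfl
  · rfl

theorem pv_getD_setD {α : Type} (xs : List α) (i j : Int) (v d : α)
    (hi0 : 0 ≤ i) (hi : i < xs.length) (hj0 : 0 ≤ j) :
    PySem.List.pyGetD (PySem.List.pySetD xs i v) j d =
      if j = i then v else PySem.List.pyGetD xs j d := by
  rw [PySem.List.pySetD_of_nonneg _ _ hi0, PySem.List.pyGetD_of_nonneg _ _ hj0,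
    PySem.List.pyGetD_of_nonneg _ _ hj0]
  rw [List.getD_eq_getElem?_getD, List.getD_eq_getElem?_getD, List.getElem?_set]
  by_cases hji : j = i
  · have h2 : i.toNat < xs.length := by omega
    have h3 : j.toNat < xs.length := by omega
    simp [hji, h2]
  · have h1 : i.toNat ≠ j.toNat := by omega
    simp [hji, h1]

theorem pv_slot (g : List (List Int)) (C : Int) (hC1 : 1 ≤ C) (hC9 : C ≤ 9) :
    ∀ (ps : List (Int × Int)) (bnds : List (Option (Int × Int × Int × Int))),
    bnds.length = 10 →
    PySem.List.pyGetD (ps.foldl (pvUpd g) bnds) C none =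
      (ps.filter (fun p => pvVal g p.1 p.2 = C)).foldl pvComb (PySem.List.pyGetD bnds C none) := by
  intro ps
  induction ps with
  | nil => intro bnds _; rfl
  | cons p t ih =>
    intro bnds hlen
    rw [List.foldl_cons, List.filter_cons]
    rw [pvUpd_eq]
    by_cases hv : 1 ≤ pvVal g p.1 p.2 ∧ pvVal g p.1 p.2 ≤ 9
    · rw [if_pos hv]
      by_cases hvc : pvVal g p.1 p.2 = C
      · rw [ih _ (by rw [PySem.List.length_pySetD]; exact hlen)]
        rw [hvc, pv_getD_setD _ _ _ _ _ (by omega) (by omega) (by omega)]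
        simp
      · rw [ih _ (by rw [PySem.List.length_pySetD]; exact hlen)]
        rw [pv_getD_setD _ _ _ _ _ (by omega) (by omega) (by omega)]
        rw [if_neg (by omega)]
        simp [hvc]
    · rw [if_neg hv]
      have hvc : ¬ pvVal g p.1 p.2 = C := by omega
      rw [ih _ hlen]
      simp [hvc]

theorem pv_init_slot (C : Int) (hC : 0 ≤ C) :
    PySem.List.pyGetD (List.replicate 10 (none : Option (Int × Int × Int × Int))) C none = none := by
  rw [PySem.List.pyGetD_of_nonneg _ _ hC, List.getD_eq_getElem?_getD]
  cases h : (List.replicate 10 (none : Option (Int × Int × Int × Int)))[C.toNat]? with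
  | none => rfl
  | some x =>
    have := List.mem_of_getElem? h
    simp [List.eq_of_mem_replicate this]

theorem pvB_bounds (g : List (List Int)) (w : Int) :
    ((PySem.List.enumerate g).foldl (fun bnds rr =>
        (PySem.List.pyRange 0 w).foldl (fun bnds c =>
          let v := PySem.List.pyGetD rr.2 c 0
          if 1 ≤ v ∧ v ≤ 9 then
            match PySem.List.pyGetD bnds v none with
            | none => PySem.List.pySetD bnds v (some (rr.1, rr.1, c, c))
            | some b =>
              PySem.List.pySetD bnds v
                (some (min b.1 rr.1, max b.2.1 rr.1, min b.2.2.1 c, max b.2.2.2 c))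
          else bnds) bnds)
      (List.replicate 10 (none : Option (Int × Int × Int × Int)))) =
    (pvCells (PySem.List.len g) w).foldl (pvUpd g) (List.replicate 10 none) := by
  rw [PySem.List.enumerate_eq_map_pyRange g [], List.foldl_map]
  unfold pvCells
  rw [List.foldl_flatMap]
  apply PySem.List.foldl_congr_mem
  intro acc r _
  rw [List.foldl_map]
  rfl

theorem pv_bounds_slot (g : List (List Int)) (h w C : Int) (hC1 : 1 ≤ C) (hC9 : C ≤ 9) :
    PySem.List.pyGetD ((pvCells h w).foldl (pvUpd g) (List.replicate 10 none)) C none =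
      pvAgg g h w C := by
  rw [pv_slot g C hC1 hC9 _ _ (by simp), pv_init_slot C (by omega)]
  rfl

-- ----- B's selection loop is a pair of running maxima -----

theorem pvB_sel_fold (g : List (List Int)) (h w : Int) (l : List Int) :
    ∀ (s1 s2 : Option (Int × Int × Int × Int × Int × Int)),
    l.foldl (fun st C =>
      match pvAgg g h w C with
      | none => st
      | some b =>
        let area := (b.2.1 - b.1 + 1) * (b.2.2.2 - b.2.2.1 + 1)
        let x := (area, C, b.1, b.2.1, b.2.2.1, b.2.2.2)
        let best := match st.1 with
          | none => some x
          | some y => if y.1 < area ∨ (y.1 = area ∧ y.2.1 < C) then some x else some y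
        let high := if 6 ≤ C then
            match st.2 with
            | none => some x
            | some y => if y.1 < area ∨ (y.1 = area ∧ y.2.1 < C) then some x else some y
          else st.2
        (best, high)) (s1, s2) =
    ((l.filterMap (pvFC g h w)).foldl pvRm s1,
     ((l.filterMap (pvFC g h w)).filter (fun x => 6 ≤ x.2.1)).foldl pvRm s2) := by
  induction l with
  | nil => intro s1 s2; rfl
  | cons C t ih =>
    intro s1 s2
    cases hagg : pvAgg g h w C with
    | none =>
      have hfc : pvFC g h w C = none := by unfold pvFC; rw [hagg]; rfl
      simp only [List.foldl_cons, hagg, hfc, List.filterMap_cons]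
      exact ih s1 s2
    | some b =>
      have hfc : pvFC g h w C = some (pvInfo C b) := by unfold pvFC; rw [hagg]; rfl
      simp only [List.foldl_cons, hagg, hfc, List.filterMap_cons, List.filter_cons]
      rw [ih]
      have h21 : (pvInfo C b).2.1 = C := rfl
      by_cases h6 : 6 ≤ C
      · simp only [h21, h6, decide_true, if_pos, List.foldl_cons]
        cases s1 <;> cases s2 <;> rfl
      · simp only [h21, h6, decide_false]
        cases s1 <;> cases s2 <;> rfl


-- ----- A's zero-fill-and-scatter equals B's comprehension -----

def pvSet2 (o : List (List Int)) (a b v : Int) : List (List Int) :=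
  PySem.List.pySetD o a (PySem.List.pySetD (PySem.List.pyGetD o a []) b v)

def pvScatUpd (g : List (List Int)) (C r0 c0 : Int) (o : List (List Int)) (p : Int × Int) :
    List (List Int) :=
  if pvVal g p.1 p.2 = C then pvSet2 o (p.1 - r0) (p.2 - c0) C else o

def pvShape (H W : Nat) (o : List (List Int)) : Prop :=
  o.length = H ∧ ∀ row ∈ o, row.length = W

theorem pv_foldl_cells {β : Type} (h w : Int) (f : β → Int → Int → β) (init : β) :
    (PySem.List.pyRange 0 h).foldl
      (fun a r => (PySem.List.pyRange 0 w).foldl (fun a c => f a r c) a) init =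
    (pvCells h w).foldl (fun a p => f a p.1 p.2) init := by
  unfold pvCells
  rw [List.foldl_flatMap]
  apply PySem.List.foldl_congr_mem
  intro acc r _
  rw [List.foldl_map]

theorem pvSet2_shape {H W : Nat} {o : List (List Int)} (hs : pvShape H W o) (a b v : Int)
    (ha0 : 0 ≤ a) (ha : a < (H : Int)) : pvShape H W (pvSet2 o a b v) := by
  obtain ⟨hlen, hrow⟩ := hs
  constructor
  · unfold pvSet2; rw [PySem.List.length_pySetD, hlen]
  · intro row hr
    unfold pvSet2 at hr
    rw [PySem.List.pySetD_of_nonneg _ _ ha0] at hr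
    rcases List.mem_or_eq_of_mem_set hr with hr | rfl
    · exact hrow _ hr
    · rw [PySem.List.length_pySetD]
      apply hrow
      apply PySem.List.pyGetD_mem
      constructor <;> omega

theorem pvVal_set2 {H W : Nat} {o : List (List Int)} (hs : pvShape H W o) (a b v i j : Int)
    (ha0 : 0 ≤ a) (ha : a < (H : Int)) (hb0 : 0 ≤ b) (hb : b < (W : Int))
    (hi0 : 0 ≤ i) (_hi : i < (H : Int)) (hj0 : 0 ≤ j) (_hj : j < (W : Int)) :
    pvVal (pvSet2 o a b v) i j = if i = a ∧ j = b then v else pvVal o i j := by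
  obtain ⟨hlen, hrow⟩ := hs
  unfold pvVal pvSet2
  rw [pv_getD_setD _ _ _ _ _ ha0 (by omega) hi0]
  by_cases hia : i = a
  · rw [if_pos hia]
    have hrl : (PySem.List.pyGetD o a []).length = W := by
      apply hrow
      apply PySem.List.pyGetD_mem
      constructor <;> omega
    rw [pv_getD_setD _ _ _ _ _ hb0 (by omega) hj0]
    by_cases hjb : j = b
    · simp [hia, hjb]
    · simp [hia, hjb]
  · rw [if_neg hia, if_neg (by tauto)]

theorem pvScatter_shape (g : List (List Int)) (C r0 c0 r1 c1 : Int) {H W : Nat}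
    (hH : (H : Int) = r1 - r0 + 1) (_hW : (W : Int) = c1 - c0 + 1) :
    ∀ (ps : List (Int × Int)) (o : List (List Int)),
    (∀ p ∈ ps, pvVal g p.1 p.2 = C → r0 ≤ p.1 ∧ p.1 ≤ r1 ∧ c0 ≤ p.2 ∧ p.2 ≤ c1) →
    pvShape H W o → pvShape H W (ps.foldl (pvScatUpd g C r0 c0) o) := by
  intro ps
  induction ps with
  | nil => intro o _ hs; exact hs
  | cons p t ih =>
    intro o hb hs
    rw [List.foldl_cons]
    apply ih _ (fun q hq => hb q (List.mem_cons_of_mem _ hq))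
    unfold pvScatUpd
    by_cases hm : pvVal g p.1 p.2 = C
    · rw [if_pos hm]
      have := hb p (List.mem_cons_self ..) hm
      exact pvSet2_shape hs _ _ _ (by omega) (by omega)
    · rw [if_neg hm]; exact hs

theorem pvScatter_get (g : List (List Int)) (C r0 c0 r1 c1 : Int) {H W : Nat}
    (hH : (H : Int) = r1 - r0 + 1) (hW : (W : Int) = c1 - c0 + 1) :
    ∀ (ps : List (Int × Int)) (o : List (List Int)) (i j : Int),
    (∀ p ∈ ps, pvVal g p.1 p.2 = C → r0 ≤ p.1 ∧ p.1 ≤ r1 ∧ c0 ≤ p.2 ∧ p.2 ≤ c1) →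
    pvShape H W o → 0 ≤ i → i < (H : Int) → 0 ≤ j → j < (W : Int) →
    pvVal (ps.foldl (pvScatUpd g C r0 c0) o) i j =
      if ∃ p ∈ ps, pvVal g p.1 p.2 = C ∧ p.1 - r0 = i ∧ p.2 - c0 = j then C
      else pvVal o i j := by
  intro ps
  induction ps with
  | nil => intro o i j _ _ _ _ _ _; simp
  | cons p t ih =>
    intro o i j hb hs hi0 hi hj0 hj
    rw [List.foldl_cons]
    by_cases hm : pvVal g p.1 p.2 = C
    · have hpb := hb p (List.mem_cons_self ..) hm
      have hupd : pvScatUpd g C r0 c0 o p = pvSet2 o (p.1 - r0) (p.2 - c0) C := by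
        unfold pvScatUpd; rw [if_pos hm]
      rw [hupd]
      rw [ih _ i j (fun q hq => hb q (List.mem_cons_of_mem _ hq))
        (pvSet2_shape hs _ _ _ (by omega) (by omega)) hi0 hi hj0 hj]
      by_cases he : ∃ q ∈ t, pvVal g q.1 q.2 = C ∧ q.1 - r0 = i ∧ q.2 - c0 = j
      · rw [if_pos he, if_pos (by rcases he with ⟨q, hq, hh⟩; exact ⟨q, List.mem_cons_of_mem _ hq, hh⟩)]
      · rw [if_neg he]
        rw [pvVal_set2 hs _ _ _ _ _ (by omega) (by omega) (by omega) (by omega) hi0 hi hj0 hj]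
        by_cases hij : i = p.1 - r0 ∧ j = p.2 - c0
        · rw [if_pos hij, if_pos ⟨p, List.mem_cons_self .., hm, by omega, by omega⟩]
        · rw [if_neg hij, if_neg ?_]
          rintro ⟨q, hq, hqv, hq1, hq2⟩
          rcases List.mem_cons.1 hq with rfl | hq
          · exact hij ⟨by omega, by omega⟩
          · exact he ⟨q, hq, hqv, hq1, hq2⟩
    · have hupd : pvScatUpd g C r0 c0 o p = o := by unfold pvScatUpd; rw [if_neg hm]
      rw [hupd]
      rw [ih _ i j (fun q hq => hb q (List.mem_cons_of_mem _ hq)) hs hi0 hi hj0 hj]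
      by_cases he : ∃ q ∈ t, pvVal g q.1 q.2 = C ∧ q.1 - r0 = i ∧ q.2 - c0 = j
      · rw [if_pos he, if_pos (by rcases he with ⟨q, hq, hh⟩; exact ⟨q, List.mem_cons_of_mem _ hq, hh⟩)]
      · rw [if_neg he, if_neg ?_]
        rintro ⟨q, hq, hqv, hq1, hq2⟩
        rcases List.mem_cons.1 hq with rfl | hq
        · exact hm hqv
        · exact he ⟨q, hq, hqv, hq1, hq2⟩


theorem pvVal_getElem (o : List (List Int)) (i j : Nat) (hi : i < o.length)
    (hj : j < (o[i]).length) : pvVal o (i : Int) (j : Int) = o[i][j] := by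
  unfold pvVal
  rw [PySem.List.pyGetD_of_nonneg _ _ (Int.natCast_nonneg i),
    List.getD_eq_getElem?_getD, Int.toNat_natCast, List.getElem?_eq_getElem hi,
    Option.getD_some, PySem.List.pyGetD_of_nonneg _ _ (Int.natCast_nonneg j),
    List.getD_eq_getElem?_getD, Int.toNat_natCast, List.getElem?_eq_getElem hj,
    Option.getD_some]

theorem pvBuild_eq (g : List (List Int)) (h w C r0 r1 c0 c1 area : Int)
    (hagg : pvAgg g h w C = some (r0, r1, c0, c1)) :
    pvBuild g h w (area, C, r0, r1, c0, c1) =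
      (PySem.List.pyRange r0 (r1 + 1)).map (fun r =>
        (PySem.List.pyRange c0 (c1 + 1)).map (fun c => if pvVal g r c = C then C else 0)) := by
  obtain ⟨hmem, ha1, ha2, ha3, ha4⟩ := pvAgg_spec g h w C _ hagg
  rw [List.mem_map] at ha1 ha2 ha3 ha4
  obtain ⟨p1, hp1, he1⟩ := ha1
  obtain ⟨p2, hp2, he2⟩ := ha2
  obtain ⟨p3, hp3, he3⟩ := ha3
  obtain ⟨p4, hp4, he4⟩ := ha4
  have he1' : p1.1 = r0 := he1
  have he2' : p2.1 = r1 := he2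
  have he3' : p3.2 = c0 := he3
  have he4' : p4.2 = c1 := he4
  simp only [pv_mem_pos] at hp1 hp2 hp3 hp4
  have hb1 := hmem p1 (by rw [pv_mem_pos]; exact hp1)
  have hb2 := hmem p2 (by rw [pv_mem_pos]; exact hp2)
  have hb3 := hmem p3 (by rw [pv_mem_pos]; exact hp3)
  have hb4 := hmem p4 (by rw [pv_mem_pos]; exact hp4)
  simp only at hb1 hb2 hb3 hb4
  -- bounds of the selected box
  have hr0 : 0 ≤ r0 := by omega
  have hr01 : r0 ≤ r1 := by omega
  have hr1h : r1 < h := by omega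
  have hc0 : 0 ≤ c0 := by omega
  have hc01 : c0 ≤ c1 := by omega
  have hc1w : c1 < w := by omega
  have hH : (((r1 - r0 + 1).toNat : Nat) : Int) = r1 - r0 + 1 := by omega
  have hW : (((c1 - c0 + 1).toNat : Nat) : Int) = c1 - c0 + 1 := by omega
  have hbnd : ∀ p ∈ pvCells h w, pvVal g p.1 p.2 = C →
      r0 ≤ p.1 ∧ p.1 ≤ r1 ∧ c0 ≤ p.2 ∧ p.2 ≤ c1 := by
    intro p hp hv
    have : p ∈ pvPos g h w C := by
      rw [pv_mem_pos]
      rw [pv_mem_cells] at hp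
      exact ⟨hp.1, hp.2.1, hp.2.2.1, hp.2.2.2, hv⟩
    exact hmem p this
  have hshape0 : pvShape (r1 - r0 + 1).toNat (c1 - c0 + 1).toNat
      (List.replicate (r1 - r0 + 1).toNat (List.replicate (c1 - c0 + 1).toNat (0 : Int))) := by
    constructor
    · simp
    · intro row hr; rw [List.eq_of_mem_replicate hr]; simp
  simp only [pvBuild]
  rw [pv_foldl_cells h w (fun o r c =>
    if pvVal g r c = C then
      PySem.List.pySetD o (r - r0)
        (PySem.List.pySetD (PySem.List.pyGetD o (r - r0) []) (c - c0) C)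
    else o)]
  have hfold : (pvCells h w).foldl (fun a p =>
      if pvVal g p.1 p.2 = C then
        PySem.List.pySetD a (p.1 - r0)
          (PySem.List.pySetD (PySem.List.pyGetD a (p.1 - r0) []) (p.2 - c0) C)
      else a)
      (List.replicate (r1 - r0 + 1).toNat (List.replicate (c1 - c0 + 1).toNat (0 : Int))) =
      (pvCells h w).foldl (pvScatUpd g C r0 c0)
      (List.replicate (r1 - r0 + 1).toNat (List.replicate (c1 - c0 + 1).toNat (0 : Int))) := by
    apply PySem.List.foldl_congr_mem
    intro acc x _
    rfl
  rw [hfold]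
  have hshape := pvScatter_shape g C r0 c0 r1 c1 hH hW (pvCells h w) _ hbnd hshape0
  refine List.ext_getElem ?_ ?_
  · rw [hshape.1]
    rw [List.length_map, PySem.List.length_pyRange_one]
    omega
  · intro i hli hri
    have hiH : i < (r1 - r0 + 1).toNat := by rw [← hshape.1]; exact hli
    refine List.ext_getElem ?_ ?_
    · rw [hshape.2 _ (List.getElem_mem hli)]
      rw [List.getElem_map, List.length_map, PySem.List.length_pyRange_one]
      omega
    · intro j hlj hrj
      have hjW : j < (c1 - c0 + 1).toNat := by
        rw [hshape.2 _ (List.getElem_mem hli)] at hlj; exact hlj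
      rw [← pvVal_getElem _ i j hli hlj]
      rw [pvScatter_get g C r0 c0 r1 c1 hH hW (pvCells h w) _ (i : Int) (j : Int)
        hbnd hshape0 (Int.natCast_nonneg i) (by omega) (Int.natCast_nonneg j) (by omega)]
      simp only [List.getElem_map, PySem.List.getElem_pyRange_one]
      have hiff : (∃ p ∈ pvCells h w, pvVal g p.1 p.2 = C ∧ p.1 - r0 = (i : Int) ∧
          p.2 - c0 = (j : Int)) ↔ pvVal g (r0 + (i : Int)) (c0 + (j : Int)) = C := by
        constructor
        · rintro ⟨p, _, hv, h1, h2⟩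
          have : p = (r0 + (i : Int), c0 + (j : Int)) := by
            cases p; simp only [Prod.mk.injEq]; omega
          rw [this] at hv; exact hv
        · intro hv
          refine ⟨(r0 + (i : Int), c0 + (j : Int)), ?_, hv, by omega, by omega⟩
          rw [pv_mem_cells]
          refine ⟨by omega, by omega, by omega, by omega⟩
      by_cases hv : pvVal g (r0 + (i : Int)) (c0 + (j : Int)) = C
      · rw [if_pos (hiff.2 hv), if_pos hv]
      · rw [if_neg (fun hc => hv (hiff.1 hc)), if_neg hv]
        -- the untouched zero entry
        have hz : pvVal (List.replicate (r1 - r0 + 1).toNat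
            (List.replicate (c1 - c0 + 1).toNat (0 : Int))) (i : Int) (j : Int) = 0 := by
          rw [pvVal_getElem _ i j (by simpa using hiH)
            (by simp only [List.getElem_replicate, List.length_replicate]; exact hjW)]
          simp
        rw [hz]


theorem pvB_sel (g : List (List Int)) (h w : Int) :
    (PySem.List.pyRange 1 10).foldl
      (fun (st : Option (Int × Int × Int × Int × Int × Int) × Option (Int × Int × Int × Int × Int × Int)) C =>
        match PySem.List.pyGetD ((pvCells h w).foldl (pvUpd g) (List.replicate 10 none)) C none with
        | none => st
        | some b =>
          let area := (b.2.1 - b.1 + 1) * (b.2.2.2 - b.2.2.1 + 1)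
          let x := (area, C, b.1, b.2.1, b.2.2.1, b.2.2.2)
          let best := match st.1 with
            | none => some x
            | some y => if y.1 < area ∨ (y.1 = area ∧ y.2.1 < C) then some x else some y
          let high := if 6 ≤ C then
              match st.2 with
              | none => some x
              | some y => if y.1 < area ∨ (y.1 = area ∧ y.2.1 < C) then some x else some y
            else st.2
          (best, high)) (none, none) =
    (pvRunMax (pvCand g h w), pvRunMax ((pvCand g h w).filter (fun x => 6 ≤ x.2.1))) := by
  refine Eq.trans (PySem.List.foldl_congr_mem _ _
    (fun (st : Option (Int × Int × Int × Int × Int × Int) × Option (Int × Int × Int × Int × Int × Int)) C =>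
      match pvAgg g h w C with
      | none => st
      | some b =>
        let area := (b.2.1 - b.1 + 1) * (b.2.2.2 - b.2.2.1 + 1)
        let x := (area, C, b.1, b.2.1, b.2.2.1, b.2.2.2)
        let best := match st.1 with
          | none => some x
          | some y => if y.1 < area ∨ (y.1 = area ∧ y.2.1 < C) then some x else some y
        let high := if 6 ≤ C then
            match st.2 with
            | none => some x
            | some y => if y.1 < area ∨ (y.1 = area ∧ y.2.1 < C) then some x else some y
          else st.2
        (best, high)) _ ?_) (pvB_sel_fold g h w _ none none)
  intro st C hC
  rw [PySem.List.mem_pyRange_one] at hC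
  rw [pv_bounds_slot g h w C (by omega) (by omega)]

theorem pv_sel_build (g : List (List Int)) (h w : Int)
    (s : Int × Int × Int × Int × Int × Int) (hs : s ∈ pvCand g h w) :
    pvBuild g h w s =
      (PySem.List.pyRange s.2.2.1 (s.2.2.2.1 + 1)).map (fun r =>
        (PySem.List.pyRange s.2.2.2.2.1 (s.2.2.2.2.2 + 1)).map (fun c =>
          if pvVal g r c = s.2.1 then s.2.1 else 0)) := by
  unfold pvCand at hs
  rw [List.mem_filterMap] at hs
  obtain ⟨C, _, hfc⟩ := hs
  unfold pvFC at hfc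
  cases hagg : pvAgg g h w C with
  | none => rw [hagg] at hfc; simp at hfc
  | some b =>
    rw [hagg] at hfc
    simp only [Option.map_some, Option.some.injEq] at hfc
    obtain ⟨r0, r1, c0, c1⟩ := b
    rw [← hfc]
    exact pvBuild_eq g h w C r0 r1 c0 c1 _ hagg

theorem pv_headD_of_runMax (l : List (Int × Int × Int × Int × Int × Int))
    (s d : Int × Int × Int × Int × Int × Int) (hs : pvRunMax l = some s) :
    (PySem.List.sorted2 l (fun x => -x.1) (fun x => -x.2.1)).headD d = s := by
  have hh := pv_sorted2_head l
  rw [hs] at hh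
  cases hsort : PySem.List.sorted2 l (fun x => -x.1) (fun x => -x.2.1) with
  | nil => rw [hsort] at hh; simp at hh
  | cons a t =>
    rw [hsort] at hh
    simp only [List.head?_cons, Option.some.injEq] at hh
    rw [List.headD_cons, hh]

theorem pv_main (g : List (List Int)) : transform g = transform_alt g := by
  by_cases h0 : g = [] ∨ g.headD [] = []
  · unfold transform transform_alt
    rw [if_pos h0, if_pos h0]
  · unfold transform transform_alt
    rw [if_neg h0, if_neg h0]
    simp only []
    rw [pvA_cands g (PySem.List.len g) (PySem.List.len (g.headD [])) _ [] []]
    rw [pvB_bounds g (PySem.List.len (g.headD []))]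
    rw [pvB_sel g (PySem.List.len g) (PySem.List.len (g.headD []))]
    simp only [List.nil_append]
    set h := PySem.List.len g with hh
    set w := PySem.List.len (g.headD []) with hw
    have hcand : List.filterMap (pvFC g h w) (PySem.List.pyRange 1 10) = pvCand g h w := rfl
    rw [hcand]
    by_cases hhigh : (pvCand g h w).filter (fun x => 6 ≤ x.2.1) = []
    · rw [if_neg (fun hne => hne hhigh)]
      rw [(pvRunMax_eq_none_iff _).2 hhigh]
      by_cases hall : pvCand g h w = []
      · rw [if_pos hall, (pvRunMax_eq_none_iff _).2 hall]
      · rw [if_neg hall]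
        cases hrm : pvRunMax (pvCand g h w) with
        | none => exact absurd ((pvRunMax_eq_none_iff _).1 hrm) hall
        | some s =>
          rw [pv_headD_of_runMax _ s _ hrm]
          exact pv_sel_build g h w s (pvRunMax_mem _ _ hrm)
    · rw [if_pos hhigh]
      cases hrm : pvRunMax ((pvCand g h w).filter (fun x => 6 ≤ x.2.1)) with
      | none => exact absurd ((pvRunMax_eq_none_iff _).1 hrm) hhigh
      | some s =>
        rw [pv_headD_of_runMax _ s _ hrm]
        exact pv_sel_build g h w s
          (List.mem_of_mem_filter (pvRunMax_mem _ _ hrm))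

-- ===== VERDICT (by name: the statement is the Claim_ definition above) =====
theorem transform_spec : Claim_equal_transform := by
  intro g _ _
  unfold Spec_transform
  exact pv_main g
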